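-- pv_equiv track=rewrite | github.com/riscv-software-src/riscof | framework/test_execute.py | warl_resolver_exhaustive
-- ===== SOURCE A (Python) =====
-- def warl_resolver_exhaustive(node, field_size):
--     legal=[]
--     illegal=[]
--     max_value = 2**field_size-1
--     if 'distinct' in node:
--         legal=node['distinct']['values']
--         for i in range(max_value+1):
--             if i not in legal:
--                 illegal.append(i)
--     return legal, illegal
-- ===== SOURCE B (Python) =====
-- def warl_resolver_exhaustive(node, field_size):
--     if 'distinct' not in node:
--         return [], []
--     legal = node['distinct']['values']
--     max_value = 2 ** field_size - 1
--     illegal = []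
--     prev = -1
--     for v in sorted(set(legal)):
--         if v > max_value:
--             break
--         if v >= 0:
--             illegal.extend(range(prev + 1, v))
--             prev = v
--     illegal.extend(range(prev + 1, max_value + 1))
--     return legal, illegal
-- ===== Notes on version B (the rewrite author's own statement) =====
-- stated objective: alternative
-- what changed: Instead of scanning every i in range(2**field_size) and testing list membership, B sorts the distinct legal values once and walks them, emitting each gap between consecutive in-range legal values with range() extends, so no per-element membership test over the full range remains.
import Mathlib
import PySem

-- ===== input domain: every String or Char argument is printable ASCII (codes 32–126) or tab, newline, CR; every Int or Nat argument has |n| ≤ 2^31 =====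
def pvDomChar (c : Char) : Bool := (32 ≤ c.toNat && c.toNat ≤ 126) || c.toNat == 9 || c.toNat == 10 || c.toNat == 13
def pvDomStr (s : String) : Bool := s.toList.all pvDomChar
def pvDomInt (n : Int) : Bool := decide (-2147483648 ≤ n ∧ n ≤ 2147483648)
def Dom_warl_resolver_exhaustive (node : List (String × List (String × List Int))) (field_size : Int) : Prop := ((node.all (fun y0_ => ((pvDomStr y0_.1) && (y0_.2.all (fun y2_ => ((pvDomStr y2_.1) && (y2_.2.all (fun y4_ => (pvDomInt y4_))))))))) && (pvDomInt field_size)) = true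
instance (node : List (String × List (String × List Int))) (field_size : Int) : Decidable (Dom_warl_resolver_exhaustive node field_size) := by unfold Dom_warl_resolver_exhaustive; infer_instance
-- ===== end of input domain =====

-- ===== PORT A =====
-- B replaces A's full-range membership scan by a gap walk over the sorted distinct legal values (same return value).
def warl_resolver_exhaustive (node : List (String × List (String × List Int))) (field_size : Int) : List Int × List Int :=
  let max_value : Int := 2 ^ field_size.toNat - 1
  match (PySem.Dict.mk node).get? "distinct" with
  | none => ([], [])
  | some inner =>
    match (PySem.Dict.mk inner).get? "values" with
    | none => ([], [])   -- Python raises KeyError here; excluded by Pre_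
    | some legal =>
      (legal,
       (PySem.List.pyRange 0 (max_value + 1) 1).foldl
         (fun illegal i => if legal.contains i then illegal else illegal ++ [i]) [])

-- ===== PORT B =====
-- the for-loop of Source B: walk the sorted distinct legal values, emitting the gap before each
-- in-range value; the trailing extend(range(prev+1, max_value+1)) is the base/break result.
def pvEmitGaps (l : List Int) (prev maxv : Int) : List Int :=
  match l with
  | [] => PySem.List.pyRange (prev + 1) (maxv + 1) 1
  | v :: rest =>
    if v > maxv then PySem.List.pyRange (prev + 1) (maxv + 1) 1
    else if 0 ≤ v then PySem.List.pyRange (prev + 1) v 1 ++ pvEmitGaps rest v maxv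
    else pvEmitGaps rest prev maxv

def warl_resolver_exhaustive_alt (node : List (String × List (String × List Int))) (field_size : Int) : List Int × List Int :=
  match (PySem.Dict.mk node).get? "distinct" with
  | none => ([], [])
  | some inner =>
    match (PySem.Dict.mk inner).get? "values" with
    | none => ([], [])   -- Python raises KeyError here; excluded by Pre_
    | some legal =>
      let max_value : Int := 2 ^ field_size.toNat - 1
      (legal,
       pvEmitGaps (PySem.List.sorted (PySem.Set.ofList legal) (fun x => x)) (-1) max_value)

-- ===== PRECONDITION & SPEC =====
-- Pre_ excludes exactly the inputs where the Python A raises: with 'distinct' present, a negative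
-- field_size (TypeError: range over a float) or a 'distinct' entry lacking the 'values' key (KeyError).
def Pre_warl_resolver_exhaustive (node : List (String × List (String × List Int))) (field_size : Int) : Prop :=
  ((match (PySem.Dict.mk node).get? "distinct" with
    | none => true
    | some inner => decide (0 ≤ field_size) && ((PySem.Dict.mk inner).get? "values").isSome) = true)
instance (node : List (String × List (String × List Int))) (field_size : Int) : Decidable (Pre_warl_resolver_exhaustive node field_size) := by unfold Pre_warl_resolver_exhaustive; infer_instance

def pvWitness_warl_resolver_exhaustive : (List (String × List (String × List Int))) × Int :=
  ([("distinct", [("values", [0, 2, 3])])], 2)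

def Spec_warl_resolver_exhaustive (node : List (String × List (String × List Int))) (field_size : Int) (out : List Int × List Int) : Prop := out = warl_resolver_exhaustive_alt node field_size
instance (node : List (String × List (String × List Int))) (field_size : Int) (out : List Int × List Int) : Decidable (Spec_warl_resolver_exhaustive node field_size out) := by unfold Spec_warl_resolver_exhaustive; infer_instance

-- ===== CLAIM (what is proved, stated in full; the proofs are below) =====
def Claim_equal_warl_resolver_exhaustive : Prop := ∀ (node : List (String × List (String × List Int))) (field_size : Int), Dom_warl_resolver_exhaustive node field_size → Pre_warl_resolver_exhaustive node field_size → Spec_warl_resolver_exhaustive node field_size (warl_resolver_exhaustive node field_size)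

-- ===== LEMMAS AND PROOFS =====

-- The gap walk over a strictly increasing list l (whose nonnegative members all exceed prev)
-- produces exactly the members of range(prev+1, maxv+1) that are not in l, in ascending order.
theorem emitGaps_eq_filter (l : List Int) (prev maxv : Int)
    (hsort : l.Pairwise (· < ·)) (hprev : -1 ≤ prev)
    (hinv : ∀ v ∈ l, 0 ≤ v → prev < v) :
    pvEmitGaps l prev maxv =
      (PySem.List.pyRange (prev + 1) (maxv + 1) 1).filter (fun i => !l.contains i) := by
  induction l generalizing prev with
  | nil =>
    simp [pvEmitGaps]
  | cons v rest ih =>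
    have hrest : ∀ u ∈ rest, v < u := fun u hu =>
      (List.pairwise_cons.mp hsort).1 u hu
    unfold pvEmitGaps
    by_cases hbig : v > maxv
    · -- break: no element of v :: rest lies in [prev+1, maxv]
      simp only [hbig, if_true]
      rw [List.filter_eq_self.mpr]
      intro i hi
      have hi' := (PySem.List.mem_pyRange_one).mp hi
      simp only [Bool.not_eq_eq_eq_not, Bool.not_true, List.contains_eq_mem,
        decide_eq_false_iff_not, List.mem_cons, not_or]
      refine ⟨fun h => by omega, fun h => ?_⟩
      have := hrest i h; omega
    · simp only [hbig, if_false]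
      by_cases hnn : 0 ≤ v
      · simp only [hnn, if_true]
        have hpv : prev < v := hinv v (List.mem_cons_self) hnn
        rw [PySem.List.pyRange_one_append (prev + 1) v (maxv + 1) (by omega) (by omega),
            PySem.List.pyRange_one_cons (by omega : v < maxv + 1)]
        rw [List.filter_append, List.filter_cons]
        have hvmem : (!((v :: rest).contains v)) = false := by
          simp
        rw [hvmem]
        simp only [Bool.false_eq_true, if_false]
        congr 1
        · -- the gap before v: nothing in l lies there
          rw [List.filter_eq_self.mpr]
          intro i hi
          have hi' := (PySem.List.mem_pyRange_one).mp hi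
          simp only [Bool.not_eq_eq_eq_not, Bool.not_true, List.contains_eq_mem,
            decide_eq_false_iff_not, List.mem_cons, not_or]
          refine ⟨fun h => by omega, fun h => ?_⟩
          have := hrest i h; omega
        · -- the tail: v never matches there, so l and rest filter alike; then IH
          rw [ih v (List.pairwise_cons.mp hsort).2 (by omega)
              (fun u hu _ => hrest u hu)]
          apply List.filter_congr
          intro i hi
          have hi' := (PySem.List.mem_pyRange_one).mp hi
          simp only [List.contains_eq_mem, List.mem_cons, Bool.not_eq_eq_eq_not]
          have : ¬ i = v := by omega
          simp [this]
      · -- skip a negative value: it is below the range, filter unchanged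
        simp only [hnn, if_false]
        rw [ih prev (List.pairwise_cons.mp hsort).2 hprev
            (fun u hu h0 => hinv u (List.mem_cons_of_mem _ hu) h0)]
        apply List.filter_congr
        intro i hi
        have hi' := (PySem.List.mem_pyRange_one).mp hi
        simp only [List.contains_eq_mem, List.mem_cons, Bool.not_eq_eq_eq_not]
        have : ¬ i = v := by omega
        simp [this]

-- ===== VERDICT (by name: the statement is the Claim_ definition above) =====
theorem warl_resolver_exhaustive_spec : Claim_equal_warl_resolver_exhaustive := by
  intro node field_size _hdom _hpre
  unfold Spec_warl_resolver_exhaustive warl_resolver_exhaustive warl_resolver_exhaustive_alt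
  cases (PySem.Dict.mk node).get? "distinct" with
  | none => rfl
  | some inner =>
    dsimp only
    cases (PySem.Dict.mk inner).get? "values" with
    | none => rfl
    | some legal =>
      dsimp only
      have hfun : (fun (illegal : List Int) (i : Int) =>
          if legal.contains i then illegal else illegal ++ [i]) =
          (fun illegal i => if (!legal.contains i) = true then illegal ++ [i] else illegal) := by
        funext acc i
        cases h : legal.contains i <;> simp
      rw [hfun, PySem.List.foldl_append_if_eq_filter, List.nil_append]
      rw [emitGaps_eq_filter _ (-1) (2 ^ field_size.toNat - 1)
            (PySem.List.sorted_ofList_pairwise_lt _)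
            (by omega) (fun v _ h0 => by omega)]
      rw [show ((-1 : Int) + 1) = 0 from by ring,
          show ((2 : Int) ^ field_size.toNat - 1 + 1) = 2 ^ field_size.toNat from by ring]
      refine congrArg (Prod.mk legal) ?_
      apply List.filter_congr
      intro i _
      simp only [List.contains_eq_mem, PySem.List.mem_sorted, PySem.Set.mem_ofList]
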